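-- pv_equiv track=rewrite | github.com/PittYHL/DP_MBQC | DP.py | rank_depth
-- ===== SOURCE A (Python) =====
-- import copy
--
-- def rank_depth(new_wire, depths): #for each depth, show its wires
--     copy_new_wire = copy.deepcopy(new_wire)
--     copy_new_wire = list(set(copy_new_wire))
--     copy_new_wire.sort()
--     copy_copy_depths = copy.deepcopy(depths)
--     copy_depths = copy.deepcopy(depths)
--     copy_depths.sort()
--     copy_depths = list(set(copy_depths))
--     copy_depths.sort()
--     wires = []
--     for i in range(len(copy_depths)):
--         wires.append([])
--     for j in range(len(copy_depths)):
--         for i in range(len(depths)):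
--             if depths[i] == copy_depths[j]:
--                 wires[j].append(new_wire[i])
--         wires[j].sort()
--     return wires, copy_depths, copy_new_wire
-- ===== SOURCE B (Python) =====
-- def rank_depth(new_wire, depths):  # single-pass dict grouping depth -> wires, then sort
--     groups = {}
--     for d, w in zip(depths, new_wire):
--         groups.setdefault(d, []).append(w)
--     copy_depths = sorted(groups)
--     wires = [sorted(groups[d]) for d in copy_depths]
--     return wires, copy_depths, sorted(set(new_wire))
-- ===== Notes on version B (the rewrite author's own statement) =====
-- stated objective: faster
-- what changed: replaces the per-unique-depth rescan of the whole depths list (U*N nested loops) by one pass that groups wires into a dict keyed by depth, then sorts the keys and each group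
import Mathlib
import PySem

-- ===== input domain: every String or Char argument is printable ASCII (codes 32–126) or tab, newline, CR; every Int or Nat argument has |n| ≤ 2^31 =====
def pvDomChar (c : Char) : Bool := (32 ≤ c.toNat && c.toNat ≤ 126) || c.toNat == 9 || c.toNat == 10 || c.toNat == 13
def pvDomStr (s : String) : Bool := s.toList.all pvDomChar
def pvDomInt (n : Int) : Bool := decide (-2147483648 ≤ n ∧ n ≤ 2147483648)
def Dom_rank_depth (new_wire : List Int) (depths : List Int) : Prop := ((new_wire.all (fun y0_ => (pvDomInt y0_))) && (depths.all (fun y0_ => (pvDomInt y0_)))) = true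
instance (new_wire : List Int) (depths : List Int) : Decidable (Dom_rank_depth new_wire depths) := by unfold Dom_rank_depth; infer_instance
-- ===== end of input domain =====

-- B replaces A's rescan of the whole depths list per unique depth by one grouping pass
-- over zip(depths, new_wire) into a dict, then sorts the keys and each group (objective: faster).

-- ===== PORT A =====
-- literal transliteration of A; the unused 'copy_copy_depths = copy.deepcopy(depths)' binds nothing observable and is omitted
def rank_depth (new_wire : List Int) (depths : List Int) : List (List Int) × List Int × List Int :=
  let copy_new_wire := PySem.Set.ofList new_wire            -- list(set(copy_new_wire))
  let copy_new_wire := PySem.List.sorted copy_new_wire (fun x => x) false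
  let copy_depths := PySem.List.sorted depths (fun x => x) false
  let copy_depths := PySem.Set.ofList copy_depths
  let copy_depths := PySem.List.sorted copy_depths (fun x => x) false
  let wires : List (List Int) :=
    (PySem.List.pyRange 0 (copy_depths.length : Int) 1).foldl (fun ws _ => ws ++ [[]]) []
  let wires :=
    (PySem.List.pyRange 0 (copy_depths.length : Int) 1).foldl (fun ws j =>
      let ws := (PySem.List.pyRange 0 (depths.length : Int) 1).foldl (fun ws i =>
        if PySem.List.pyGetD depths i 0 == PySem.List.pyGetD copy_depths j 0 then
          PySem.List.pySetD ws j (PySem.List.pyGetD ws j [] ++ [PySem.List.pyGetD new_wire i 0])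
        else ws) ws
      PySem.List.pySetD ws j (PySem.List.sorted (PySem.List.pyGetD ws j []) (fun x => x) false)) wires
  (wires, copy_depths, copy_new_wire)

-- ===== PORT B =====
def rank_depth_alt (new_wire : List Int) (depths : List Int) : List (List Int) × List Int × List Int :=
  -- groups.setdefault(d, []).append(w)  ==  d[k] = f(d.get(k, []))  ==  Dict.modify
  let groups := (depths.zip new_wire).foldl
    (fun g p => g.modify p.1 [] (fun l => l ++ [p.2])) PySem.Dict.empty
  let copy_depths := PySem.List.sorted groups.keys (fun x => x) false
  -- groups[d] for d ∈ keys: lookup never misses, so getD _ [] is exact here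
  let wires := copy_depths.map (fun d => PySem.List.sorted (groups.getD d []) (fun x => x) false)
  (wires, copy_depths, PySem.List.sorted (PySem.Set.ofList new_wire) (fun x => x) false)

-- ===== PRECONDITION & SPEC =====
-- Pre_ excludes exactly the inputs where A raises IndexError: A reads new_wire[i] for every
-- i < len(depths), so it requires len(depths) ≤ len(new_wire).
def Pre_rank_depth (new_wire : List Int) (depths : List Int) : Prop :=
  depths.length ≤ new_wire.length
instance (new_wire : List Int) (depths : List Int) : Decidable (Pre_rank_depth new_wire depths) := by
  unfold Pre_rank_depth; infer_instance
def pvWitness_rank_depth : List Int × List Int := ([3, 1, 2, 1], [0, 1, 0, 1])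
def Spec_rank_depth (new_wire : List Int) (depths : List Int) (out : List (List Int) × List Int × List Int) : Prop := out = rank_depth_alt new_wire depths
instance (new_wire : List Int) (depths : List Int) (out : List (List Int) × List Int × List Int) : Decidable (Spec_rank_depth new_wire depths out) := by unfold Spec_rank_depth; infer_instance

-- ===== CLAIM (what is proved, stated in full; the proofs are below) =====
def Claim_equal_rank_depth : Prop := ∀ (new_wire : List Int) (depths : List Int), Dom_rank_depth new_wire depths → Pre_rank_depth new_wire depths → Spec_rank_depth new_wire depths (rank_depth new_wire depths)

-- ===== LEMMAS AND PROOFS =====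

-- the wires of a single depth c, in input order
def collectL (z : List (Int × Int)) (c : Int) : List Int :=
  (z.filter (fun p => p.1 == c)).map (·.2)

-- the sorted group of depth c
def grpF (z : List (Int × Int)) (c : Int) : List Int :=
  PySem.List.sorted (collectL z c) (fun x => x) false

theorem foldl_append_nil (l : List Int) (acc : List (List Int)) :
    l.foldl (fun ws _ => ws ++ [([] : List Int)]) acc = acc ++ List.replicate l.length [] := by
  induction l generalizing acc with
  | nil => simp
  | cons x t ih => simp [List.foldl_cons, ih, List.replicate_succ]

theorem inner_loop (new_wire depths : List Int) (hpre : depths.length ≤ new_wire.length)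
    (c : Int) (n : Nat) (hn : n ≤ depths.length) (ws : List (List Int)) (j : Nat)
    (hj : j < ws.length) :
    (PySem.List.pyRange 0 (n : Int) 1).foldl (fun ws i =>
        if PySem.List.pyGetD depths i 0 == c then
          PySem.List.pySetD ws (j : Int) (PySem.List.pyGetD ws (j : Int) [] ++ [PySem.List.pyGetD new_wire i 0])
        else ws) ws
      = PySem.List.pySetD ws (j : Int)
          (PySem.List.pyGetD ws (j : Int) [] ++ collectL ((depths.zip new_wire).take n) c) := by
  induction n with
  | zero =>
      simp only [Nat.cast_zero, PySem.List.pyRange_zero, Int.toNat_zero, List.range_zero,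
        List.map_nil, List.foldl_nil, List.take_zero,
        collectL, List.filter_nil, List.append_nil,
        PySem.List.pySetD_natCast, PySem.List.pyGetD_natCast, List.getD_eq_getElem _ _ hj,
        List.set_getElem_self]
  | succ n ih =>
      have hn' : n ≤ depths.length := Nat.le_of_succ_le hn
      have hnlt : n < depths.length := hn
      have hnw : n < new_wire.length := lt_of_lt_of_le hnlt hpre
      have hz : n < (depths.zip new_wire).length := by
        simp [List.length_zip]; omega
      have hcast : ((n + 1 : Nat) : Int) = (n : Int) + 1 := by push_cast; ring
      rw [hcast, PySem.List.pyRange_one_succ_right (by positivity), List.foldl_append,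
        ih hn']
      have htake : (depths.zip new_wire).take (n + 1)
          = (depths.zip new_wire).take n ++ [(depths[n], new_wire[n])] := by
        rw [List.take_add_one, List.getElem?_eq_getElem hz]
        simp [List.getElem_zip]
      simp only [List.foldl_cons, List.foldl_nil, htake]
      have hcoll : collectL ((depths.zip new_wire).take n ++ [(depths[n], new_wire[n])]) c
          = collectL ((depths.zip new_wire).take n) c
            ++ (if depths[n] == c then [new_wire[n]] else []) := by
        simp only [collectL, List.filter_append, List.map_append]
        by_cases h : depths[n] == c <;> simp [h]
      rw [hcoll]
      have hdg : PySem.List.pyGetD depths ((n : Nat) : Int) 0 = depths[n] := by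
        rw [PySem.List.pyGetD_natCast, List.getD_eq_getElem _ _ hnlt]
      have hwg : PySem.List.pyGetD new_wire ((n : Nat) : Int) 0 = new_wire[n] := by
        rw [PySem.List.pyGetD_natCast, List.getD_eq_getElem _ _ hnw]
      by_cases h : depths[n] == c
      · simp only [hdg, hwg, h, if_pos]
        rw [PySem.List.pyGetD_pySetD_natCast _ _ _ _ _ hj]
        simp [PySem.List.pySetD_natCast, List.set_set, List.append_assoc]
      · simp [hdg, h]

theorem outer_loop (new_wire depths : List Int) (hpre : depths.length ≤ new_wire.length)
    (cd : List Int) (m : Nat) (hm : m ≤ cd.length) :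
    (PySem.List.pyRange 0 (m : Int) 1).foldl (fun ws j =>
        let ws := (PySem.List.pyRange 0 (depths.length : Int) 1).foldl (fun ws i =>
          if PySem.List.pyGetD depths i 0 == PySem.List.pyGetD cd j 0 then
            PySem.List.pySetD ws j (PySem.List.pyGetD ws j [] ++ [PySem.List.pyGetD new_wire i 0])
          else ws) ws
        PySem.List.pySetD ws j (PySem.List.sorted (PySem.List.pyGetD ws j []) (fun x => x) false))
      (List.replicate cd.length [])
      = (cd.take m).map (grpF (depths.zip new_wire)) ++ List.replicate (cd.length - m) [] := by
  induction m with
  | zero => simp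
  | succ m ih =>
      have hm' : m ≤ cd.length := Nat.le_of_succ_le hm
      have hmlt : m < cd.length := hm
      have hcast : ((m + 1 : Nat) : Int) = (m : Int) + 1 := by push_cast; ring
      rw [hcast, PySem.List.pyRange_one_succ_right (by positivity), List.foldl_append,
        ih hm']
      set wsm := (cd.take m).map (grpF (depths.zip new_wire)) ++ List.replicate (cd.length - m) []
        with hws
      have hlen_take : ((cd.take m).map (grpF (depths.zip new_wire))).length = m := by
        simp [List.length_take]; omega
      have hlws : wsm.length = cd.length := by
        simp [hws, List.length_take]; omega
      have hj : m < wsm.length := by omega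
      have hc : PySem.List.pyGetD cd ((m : Nat) : Int) 0 = cd[m] := by
        rw [PySem.List.pyGetD_natCast, List.getD_eq_getElem _ _ hmlt]
      have hzlen : (depths.zip new_wire).length = depths.length := by
        simp [List.length_zip]; omega
      have htakez : (depths.zip new_wire).take depths.length = depths.zip new_wire :=
        List.take_of_length_le (le_of_eq hzlen)
      have hrepl : cd.length - m = (cd.length - (m + 1)) + 1 := by omega
      have hslot : PySem.List.pyGetD wsm ((m : Nat) : Int) [] = [] := by
        rw [PySem.List.pyGetD_natCast]
        have h1 : wsm.getD m [] = (wsm[m]?).getD [] := by simp [List.getD]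
        rw [h1, hws, List.getElem?_append_right hlen_take.le]
        rw [hlen_take, Nat.sub_self, List.getElem?_replicate]
        rw [if_pos (by omega)]
        rfl
      simp only [List.foldl_cons, List.foldl_nil, hc]
      rw [inner_loop new_wire depths hpre cd[m] depths.length (le_refl _) wsm m hj,
        htakez, hslot, List.nil_append,
        PySem.List.pyGetD_pySetD_natCast _ _ _ _ _ hj]
      simp only [PySem.List.pySetD_natCast, List.set_set]
      rw [hws, List.set_append, if_neg (by omega), hlen_take, Nat.sub_self, hrepl,
        List.replicate_succ, List.set_cons_zero]
      simp only [if_true]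
      rw [List.take_add_one, List.getElem?_eq_getElem hmlt]
      simp only [List.map_append, List.map_take]
      simp [grpF]

theorem cd_eq (depths : List Int) :
    PySem.List.sorted (PySem.Set.ofList (PySem.List.sorted depths (fun x => x) false)) (fun x => x) false
      = PySem.List.sorted (PySem.Set.ofList depths) (fun x => x) false := by
  apply PySem.List.sorted_eq_sorted_of_perm _ _ _ (fun a b h => h)
  rw [List.perm_ext_iff_of_nodup (PySem.Set.nodup_ofList _) (PySem.Set.nodup_ofList _)]
  intro a
  simp [PySem.Set.mem_ofList, PySem.List.mem_sorted]

theorem rank_depth_A_eq (new_wire depths : List Int)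
    (hpre : depths.length ≤ new_wire.length) :
    rank_depth new_wire depths
      = ((PySem.List.sorted (PySem.Set.ofList (PySem.List.sorted depths (fun x => x) false)) (fun x => x) false).map
            (grpF (depths.zip new_wire)),
          PySem.List.sorted (PySem.Set.ofList (PySem.List.sorted depths (fun x => x) false)) (fun x => x) false,
          PySem.List.sorted (PySem.Set.ofList new_wire) (fun x => x) false) := by
  dsimp only [rank_depth]
  set cd := PySem.List.sorted (PySem.Set.ofList (PySem.List.sorted depths (fun x => x) false)) (fun x => x) false
  have hinit : (PySem.List.pyRange 0 (cd.length : Int) 1).foldl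
      (fun ws _ => ws ++ [([] : List Int)]) [] = List.replicate cd.length [] := by
    rw [foldl_append_nil, PySem.List.length_pyRange_one]
    simp
  rw [hinit, outer_loop new_wire depths hpre cd cd.length (le_refl _)]
  simp

theorem rank_depth_B_eq (new_wire depths : List Int)
    (hpre : depths.length ≤ new_wire.length) :
    rank_depth_alt new_wire depths
      = ((PySem.List.sorted (PySem.Set.ofList depths) (fun x => x) false).map
            (grpF (depths.zip new_wire)),
          PySem.List.sorted (PySem.Set.ofList depths) (fun x => x) false,
          PySem.List.sorted (PySem.Set.ofList new_wire) (fun x => x) false) := by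
  dsimp only [rank_depth_alt]
  have hkeys : ((depths.zip new_wire).foldl
      (fun g p => g.modify p.1 [] (fun l => l ++ [p.2])) PySem.Dict.empty).keys
      = PySem.Set.ofList depths := by
    rw [PySem.Dict.keys_foldl_modify_key]
    simp only [PySem.Dict.keys_empty, PySem.Set.update_nil_left]
    rw [show ((depths.zip new_wire).map fun p => p.1) = (depths.zip new_wire).map Prod.fst from rfl,
      List.map_fst_zip hpre]
  simp only [hkeys, PySem.Dict.getD_foldl_modify_append, PySem.Dict.getD_empty, List.nil_append]
  rfl

-- ===== VERDICT (by name: the statement is the Claim_ definition above) =====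
theorem rank_depth_spec : Claim_equal_rank_depth := by
  intro new_wire depths _hdom hpre
  unfold Spec_rank_depth
  rw [rank_depth_A_eq new_wire depths hpre, rank_depth_B_eq new_wire depths hpre, cd_eq]
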